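-- pv_equiv track=rewrite | github.com/Rui091/Estructura-de-datos | tarea1.py | sumarValoresMatriz
-- ===== SOURCE A (Python) =====
-- def sumarValoresMatriz(disp,mat):
--     suma=0
--     for contras,numBuscar in mat:
--         for j in (disp):
--             if contras==j:
--                 for k in range(len(disp[contras])):
--                     if numBuscar==disp[contras][k][0]:
--                         suma+=disp[contras][k][1]
--     return suma
-- ===== SOURCE B (Python) =====
-- def sumarValoresMatriz(disp, mat):
--     counts = {}
--     for contras, num in mat:
--         counts[(contras, num)] = counts.get((contras, num), 0) + 1
--     total = 0
--     for contras, filas in disp.items():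
--         for num, val in filas:
--             total += val * counts.get((contras, num), 0)
--     return total
-- ===== Notes on version B (the rewrite author's own statement) =====
-- stated objective: faster
-- what changed: Instead of scanning all dict keys and rescanning the matched row for every query, B builds a frequency table of the (key, num) query pairs once and makes a single pass over disp, adding value * query-count per entry.
import Mathlib
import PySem

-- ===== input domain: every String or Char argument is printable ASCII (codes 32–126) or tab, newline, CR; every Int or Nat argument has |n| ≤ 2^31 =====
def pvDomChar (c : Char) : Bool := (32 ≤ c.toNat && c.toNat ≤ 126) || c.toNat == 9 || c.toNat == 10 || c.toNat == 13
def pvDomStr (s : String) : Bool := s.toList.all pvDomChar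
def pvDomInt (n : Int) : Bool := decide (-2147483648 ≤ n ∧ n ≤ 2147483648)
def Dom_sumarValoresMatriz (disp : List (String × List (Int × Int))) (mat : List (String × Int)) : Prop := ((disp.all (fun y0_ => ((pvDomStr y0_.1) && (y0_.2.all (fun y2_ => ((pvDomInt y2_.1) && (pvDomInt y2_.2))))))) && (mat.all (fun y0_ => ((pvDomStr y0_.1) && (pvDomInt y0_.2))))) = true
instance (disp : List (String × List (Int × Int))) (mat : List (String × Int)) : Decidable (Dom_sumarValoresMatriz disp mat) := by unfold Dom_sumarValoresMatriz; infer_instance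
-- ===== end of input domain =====

-- B replaces A's per-query key scan + row rescan by one query-frequency table and a single pass
-- over disp (objective: faster; equivalence proved on dicts, i.e. assoc lists with distinct keys).

-- ===== PORT A =====
def sumarValoresMatriz (disp : List (String × List (Int × Int))) (mat : List (String × Int)) : Int :=
  mat.foldl (fun suma q =>
    disp.foldl (fun s jp =>
      if q.1 == jp.1 then
        let row := (PySem.Dict.mk disp).getD q.1 []
        (PySem.List.pyRange 0 (row.length : Int) 1).foldl
          (fun s2 k =>
            let e := PySem.List.pyGetD row k (0, 0)
            if q.2 == e.1 then s2 + e.2 else s2) s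
      else s) suma) 0

-- ===== PORT B =====
def sumarValoresMatriz_alt (disp : List (String × List (Int × Int))) (mat : List (String × Int)) : Int :=
  let counts : PySem.Dict (String × Int) Int :=
    mat.foldl (fun d q => d.insert q (d.getD q 0 + 1)) PySem.Dict.empty
  disp.foldl (fun total kv =>
    kv.2.foldl (fun t nv => t + nv.2 * counts.getD (kv.1, nv.1) 0) total) 0

-- ===== PRECONDITION & SPEC =====
-- Pre_ excludes assoc lists with duplicate keys in disp: a Python dict cannot carry them, so the
-- first-match assoc-list reading of such inputs is an accident of the representation, not a value of A.
def Pre_sumarValoresMatriz (disp : List (String × List (Int × Int))) (mat : List (String × Int)) : Prop :=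
  (disp.map Prod.fst).Nodup
instance (disp : List (String × List (Int × Int))) (mat : List (String × Int)) : Decidable (Pre_sumarValoresMatriz disp mat) := by unfold Pre_sumarValoresMatriz; infer_instance
def pvWitness_sumarValoresMatriz : (List (String × List (Int × Int))) × (List (String × Int)) :=
  ([("a", [(1, 2)])], [("a", 1)])

def Spec_sumarValoresMatriz (disp : List (String × List (Int × Int))) (mat : List (String × Int)) (out : Int) : Prop := out = sumarValoresMatriz_alt disp mat
instance (disp : List (String × List (Int × Int))) (mat : List (String × Int)) (out : Int) : Decidable (Spec_sumarValoresMatriz disp mat out) := by unfold Spec_sumarValoresMatriz; infer_instance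

-- ===== CLAIM (what is proved, stated in full; the proofs are below) =====
def Claim_equal_sumarValoresMatriz : Prop := ∀ (disp : List (String × List (Int × Int))) (mat : List (String × Int)), Dom_sumarValoresMatriz disp mat → Pre_sumarValoresMatriz disp mat → Spec_sumarValoresMatriz disp mat (sumarValoresMatriz disp mat)

-- ===== LEMMAS AND PROOFS =====

-- sum of values of a row whose first component matches n
def pvG (n : Int) (row : List (Int × Int)) : Int :=
  (row.map (fun e => if n = e.1 then e.2 else 0)).sum

theorem pv_sum_map_add {α : Type} (l : List α) (f g : α → Int) :
    (l.map (fun x => f x + g x)).sum = (l.map f).sum + (l.map g).sum := by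
  induction l with
  | nil => simp
  | cons x xs ih => simp [ih]; ring

theorem pv_foldl_add {α : Type} (l : List α) (h : α → Int) (init : Int) :
    l.foldl (fun s x => s + h x) init = init + (l.map h).sum := by
  induction l generalizing init with
  | nil => simp
  | cons x xs ih => simp [List.foldl, ih]; ring

theorem pv_row_foldl (n : Int) (row : List (Int × Int)) (s : Int) :
    row.foldl (fun s2 e => if n == e.1 then s2 + e.2 else s2) s = s + pvG n row := by
  induction row generalizing s with
  | nil => simp [pvG]
  | cons e rest ih =>
    rw [List.foldl_cons, ih]
    unfold pvG
    by_cases h : n = e.1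
    · simp only [List.map_cons, List.sum_cons, h, beq_self_eq_true, if_pos, if_true]
      ring
    · simp [h]

-- A's middle loop over the dict keys, as a sum
theorem pv_sum_if_const (l : List (String × List (Int × Int))) (c : String) (X : Int) :
    (l.map (fun kv => if c = kv.1 then X else 0)).sum
      = ((l.map Prod.fst).count c : Int) * X := by
  induction l with
  | nil => simp
  | cons kv rest ih =>
    simp only [List.map_cons, List.sum_cons, List.count_cons, ih]
    by_cases h : c = kv.1
    · simp [h]; push_cast; ring
    · simp [h, Ne.symm h]

-- B's contribution of one disp entry for a single query q
theorem pv_row_single (q : String × Int) (kv : String × List (Int × Int)) :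
    (kv.2.map (fun nv => if (kv.1, nv.1) = q then nv.2 else 0)).sum
      = if q.1 = kv.1 then pvG q.2 kv.2 else 0 := by
  by_cases hk : q.1 = kv.1
  · rw [if_pos hk]
    unfold pvG
    refine congrArg List.sum (List.map_congr_left fun nv _ => ?_)
    by_cases hn : q.2 = nv.1
    · rw [if_pos (Prod.ext hk.symm hn.symm), if_pos hn]
    · rw [if_neg (fun h => hn (congrArg Prod.snd h).symm), if_neg hn]
  · rw [if_neg hk]
    have h0 : ∀ nv ∈ kv.2, (if (kv.1, nv.1) = q then nv.2 else 0) = 0 := by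
      intro nv _
      exact if_neg (fun h => hk (congrArg Prod.fst h).symm)
    rw [List.map_congr_left h0]
    simp

-- the data-driven double sum for B
def pvBsum (disp : List (String × List (Int × Int))) (mat : List (String × Int)) : Int :=
  (disp.map (fun kv => (kv.2.map (fun nv => nv.2 * (mat.count (kv.1, nv.1) : Int))).sum)).sum

-- the query-driven contribution (both loops over the whole disp)
def pvHb (disp : List (String × List (Int × Int))) (q : String × Int) : Int :=
  (disp.map (fun kv => if q.1 = kv.1 then pvG q.2 kv.2 else 0)).sum

theorem pv_Bsum_nil (disp : List (String × List (Int × Int))) : pvBsum disp [] = 0 := by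
  simp [pvBsum]

theorem pv_Bsum_cons (disp : List (String × List (Int × Int))) (q : String × Int)
    (mat : List (String × Int)) :
    pvBsum disp (q :: mat) = pvHb disp q + pvBsum disp mat := by
  unfold pvBsum pvHb
  have hrow : ∀ kv : String × List (Int × Int),
      (kv.2.map (fun nv => nv.2 * (((q :: mat).count (kv.1, nv.1) : Nat) : Int))).sum
        = (kv.2.map (fun nv => if (kv.1, nv.1) = q then nv.2 else 0)).sum
          + (kv.2.map (fun nv => nv.2 * ((mat.count (kv.1, nv.1) : Nat) : Int))).sum := by
    intro kv
    rw [← pv_sum_map_add]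
    refine congrArg List.sum (List.map_congr_left fun nv _ => ?_)
    by_cases h : (kv.1, nv.1) = q
    · have hb : (q == (kv.1, nv.1)) = true := beq_iff_eq.mpr h.symm
      simp only [List.count_cons, hb, if_true, if_pos h]
      push_cast
      ring
    · have hb : (q == (kv.1, nv.1)) = false := beq_eq_false_iff_ne.mpr (fun he => h he.symm)
      simp only [List.count_cons, hb, if_false, if_neg h]
      push_cast
      ring
  calc (disp.map (fun kv => (kv.2.map (fun nv => nv.2 * (((q :: mat).count (kv.1, nv.1) : Nat) : Int))).sum)).sum
      = (disp.map (fun kv =>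
          (kv.2.map (fun nv => if (kv.1, nv.1) = q then nv.2 else 0)).sum
          + (kv.2.map (fun nv => nv.2 * ((mat.count (kv.1, nv.1) : Nat) : Int))).sum)).sum := by
        exact congrArg List.sum (List.map_congr_left (fun kv _ => hrow kv))
    _ = _ := by
        rw [pv_sum_map_add]
        refine congrArg (· + _) ?_
        exact congrArg List.sum (List.map_congr_left (fun kv _ => pv_row_single q kv))

-- lookup in a nodup assoc list hits the member row
theorem pv_getD_of_mem (l : List (String × List (Int × Int))) (hnd : (l.map Prod.fst).Nodup)
    (kv : String × List (Int × Int)) (hm : kv ∈ l) :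
    (PySem.Dict.mk l).getD kv.1 [] = kv.2 := by
  induction l with
  | nil => cases hm
  | cons p rest ih =>
    simp only [List.map_cons, List.nodup_cons] at hnd
    rcases List.mem_cons.mp hm with h | h
    · subst h
      simp [PySem.Dict.getD, PySem.Dict.get?]
    · have hne : p.1 ≠ kv.1 := by
        intro he
        exact hnd.1 (he ▸ List.mem_map_of_mem h)
      have := ih hnd.2 h
      simpa [PySem.Dict.getD, PySem.Dict.get?, hne] using this

theorem pv_hb_zero (l : List (String × List (Int × Int))) (q : String × Int)
    (h : q.1 ∉ l.map Prod.fst) : pvHb l q = 0 := by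
  unfold pvHb
  have : ∀ kv ∈ l, (if q.1 = kv.1 then pvG q.2 kv.2 else 0) = 0 := by
    intro kv hkv
    rw [if_neg]
    intro he
    exact h (he ▸ List.mem_map_of_mem hkv)
  rw [List.map_congr_left this]
  simp

-- under nodup keys the query-driven sum picks exactly the member row
theorem pv_hb_mem (l : List (String × List (Int × Int))) (q : String × Int)
    (hnd : (l.map Prod.fst).Nodup) (kv : String × List (Int × Int)) (hkv : kv ∈ l)
    (hfst : kv.1 = q.1) : pvHb l q = pvG q.2 kv.2 := by
  induction l with
  | nil => cases hkv
  | cons p rest ih =>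
    simp only [List.map_cons, List.nodup_cons] at hnd
    rcases List.mem_cons.mp hkv with h | h
    · subst h
      have hz : pvHb rest q = 0 := by
        apply pv_hb_zero
        rw [← hfst]
        exact hnd.1
      unfold pvHb at hz ⊢
      rw [List.map_cons, List.sum_cons, if_pos hfst.symm, hz, add_zero]
    · have hne : q.1 ≠ p.1 := by
        intro he
        apply hnd.1
        rw [he] at hfst
        exact hfst ▸ List.mem_map_of_mem h
      have := ih hnd.2 h
      unfold pvHb at this ⊢
      simp [hne, this]

-- the bridge: under nodup keys, the query-driven sum equals count·lookup
theorem pv_hb_eq (disp : List (String × List (Int × Int))) (hnd : (disp.map Prod.fst).Nodup)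
    (q : String × Int) :
    ((disp.map Prod.fst).count q.1 : Int) * pvG q.2 ((PySem.Dict.mk disp).getD q.1 [])
      = pvHb disp q := by
  by_cases hmem : q.1 ∈ disp.map Prod.fst
  · obtain ⟨kv, hkv, hfst⟩ := List.mem_map.mp hmem
    have hcount : (disp.map Prod.fst).count q.1 = 1 :=
      List.count_eq_one_of_mem hnd hmem
    have hlook : (PySem.Dict.mk disp).getD q.1 [] = kv.2 := by
      rw [← hfst]; exact pv_getD_of_mem disp hnd kv hkv
    rw [hcount, hlook, pv_hb_mem disp q hnd kv hkv hfst]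
    simp
  · rw [pv_hb_zero disp q hmem, List.count_eq_zero_of_not_mem hmem]
    simp

-- port A as a sum over the queries
theorem pv_A_eq (disp : List (String × List (Int × Int))) (mat : List (String × Int)) :
    sumarValoresMatriz disp mat
      = (mat.map (fun q => ((disp.map Prod.fst).count q.1 : Int)
          * pvG q.2 ((PySem.Dict.mk disp).getD q.1 []))).sum := by
  unfold sumarValoresMatriz
  have hmid : ∀ (q : String × Int) (suma : Int),
      disp.foldl (fun s jp =>
        if q.1 == jp.1 then
          let row := (PySem.Dict.mk disp).getD q.1 []
          (PySem.List.pyRange 0 (row.length : Int) 1).foldl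
            (fun s2 k =>
              let e := PySem.List.pyGetD row k (0, 0)
              if q.2 == e.1 then s2 + e.2 else s2) s
        else s) suma
      = suma + ((disp.map Prod.fst).count q.1 : Int)
          * pvG q.2 ((PySem.Dict.mk disp).getD q.1 []) := by
    intro q suma
    set row := (PySem.Dict.mk disp).getD q.1 [] with hrow
    have hinner : ∀ s : Int,
        (PySem.List.pyRange 0 (row.length : Int) 1).foldl
          (fun s2 k =>
            let e := PySem.List.pyGetD row k (0, 0)
            if q.2 == e.1 then s2 + e.2 else s2) s
        = s + pvG q.2 row := by
      intro s
      rw [PySem.List.foldl_pyRange_zero_pyGetD' row (0, 0)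
        (fun s2 e => if q.2 == e.1 then s2 + e.2 else s2) s]
      exact pv_row_foldl q.2 row s
    have hfun : (fun (s : Int) (jp : String × List (Int × Int)) =>
        if q.1 == jp.1 then
          (PySem.List.pyRange 0 (row.length : Int) 1).foldl
            (fun s2 k =>
              let e := PySem.List.pyGetD row k (0, 0)
              if q.2 == e.1 then s2 + e.2 else s2) s
        else s)
        = fun s jp => s + (if q.1 = jp.1 then pvG q.2 row else 0) := by
      funext s jp
      by_cases h : q.1 = jp.1
      · simp only [h, beq_self_eq_true, if_pos, if_true]
        exact hinner s
      · simp [h]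
    rw [hfun, pv_foldl_add, pv_sum_if_const]
  have houter : (fun (suma : Int) (q : String × Int) =>
      disp.foldl (fun s jp =>
        if q.1 == jp.1 then
          let row := (PySem.Dict.mk disp).getD q.1 []
          (PySem.List.pyRange 0 (row.length : Int) 1).foldl
            (fun s2 k =>
              let e := PySem.List.pyGetD row k (0, 0)
              if q.2 == e.1 then s2 + e.2 else s2) s
        else s) suma)
      = fun suma q => suma + ((disp.map Prod.fst).count q.1 : Int)
          * pvG q.2 ((PySem.Dict.mk disp).getD q.1 []) := by
    funext suma q
    exact hmid q suma
  rw [houter, pv_foldl_add]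
  simp

-- port B as the data-driven double sum
theorem pv_B_eq (disp : List (String × List (Int × Int))) (mat : List (String × Int)) :
    sumarValoresMatriz_alt disp mat = pvBsum disp mat := by
  unfold sumarValoresMatriz_alt
  simp only [PySem.Dict.foldl_insert_getD_add_one_eq_counter, PySem.Dict.getD_counter]
  have hfun : (fun (total : Int) (kv : String × List (Int × Int)) =>
      kv.2.foldl (fun t nv => t + nv.2 * (mat.count (kv.1, nv.1) : Int)) total)
      = fun total kv =>
          total + (kv.2.map (fun nv => nv.2 * (mat.count (kv.1, nv.1) : Int))).sum := by
    funext total kv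
    rw [pv_foldl_add]
  rw [hfun, pv_foldl_add]
  simp [pvBsum]

theorem pv_Bsum_eq (disp : List (String × List (Int × Int))) (mat : List (String × Int)) :
    pvBsum disp mat = (mat.map (pvHb disp)).sum := by
  induction mat with
  | nil => simp [pv_Bsum_nil]
  | cons q rest ih => rw [pv_Bsum_cons, List.map_cons, List.sum_cons, ih]

-- ===== VERDICT (by name: the statement is the Claim_ definition above) =====
theorem sumarValoresMatriz_spec : Claim_equal_sumarValoresMatriz := by
  intro disp mat _ hpre
  unfold Spec_sumarValoresMatriz
  rw [pv_A_eq, pv_B_eq, pv_Bsum_eq]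
  congr 1
  exact List.map_congr_left (fun q _ => pv_hb_eq disp hpre q)
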